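-- pv_equiv track=rewrite | github.com/Aminehassou/spaghetti-code | IOI/cIsInferior.py | c_compatible
-- ===== SOURCE A (Python) =====
-- def c_compatible(variable):
--     x = 0
--     upLow_ = (("a" <= variable[x] and variable[x] <= "z") or ("A" <= variable[x] and variable[x] <= "Z")) or variable[x] == "_"
--     if not upLow_:
--         return "NO"
--     for y in range(1, len(variable)):
--         c = variable[y]
--         if not ((("a" <= c and c <= "z") or ("A" <= c and c <= "Z")) or c == "_" or c.isdigit()):
--             return "NO"
--     return "YES"
-- ===== SOURCE B (Python) =====
-- def c_compatible(variable):
--     # str.isidentifier() is exactly "letter/underscore then letters/digits/underscores,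
--     # nonempty" on ASCII input; empty input (where A raises IndexError) gives "NO".
--     return "YES" if variable.isidentifier() else "NO"
-- ===== Notes on version B (the rewrite author's own statement) =====
-- stated objective: idiomatic
-- what changed: B replaces A's hand-written first-character class test and index loop with a single call to the standard library predicate str.isidentifier(), which coincides with A's character classes on the ASCII domain; B has no explicit Python-level loop at all.
import Mathlib
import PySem

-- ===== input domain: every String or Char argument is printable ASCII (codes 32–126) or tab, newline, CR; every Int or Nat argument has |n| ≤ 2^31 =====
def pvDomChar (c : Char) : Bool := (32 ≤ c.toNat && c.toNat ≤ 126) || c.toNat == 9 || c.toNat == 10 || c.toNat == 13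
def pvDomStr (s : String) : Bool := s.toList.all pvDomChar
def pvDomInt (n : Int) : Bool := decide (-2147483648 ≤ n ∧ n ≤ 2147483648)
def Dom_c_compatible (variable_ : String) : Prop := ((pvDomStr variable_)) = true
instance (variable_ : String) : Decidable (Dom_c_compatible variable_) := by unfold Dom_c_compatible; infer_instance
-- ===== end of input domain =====

-- B: the idiomatic standard-library call variable.isidentifier() instead of A's
-- hand-written character-class tests and index loop; exact on the ASCII domain.
-- Return-value equivalence is claimed on nonempty strings (A raises IndexError on "").


-- ===== PORT A =====
-- the 'for y in range(1, len(variable))' loop with early return, over the remaining characters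
def cGoA : List Char → String
  | [] => "YES"
  | c :: rest =>
    if !((decide ('a' ≤ c) && decide (c ≤ 'z')) || (decide ('A' ≤ c) && decide (c ≤ 'Z')) ||
          c == '_' || PySem.Chars.isdigit c) then "NO"
    else cGoA rest

def c_compatible (variable_ : String) : String :=
  let xs := variable_.toList
  let c0 := PySem.List.pyGetD xs 0 ' '   -- variable[0]; Pre_ excludes the empty string (IndexError)
  let upLow :=
    (decide ('a' ≤ c0) && decide (c0 ≤ 'z')) || (decide ('A' ≤ c0) && decide (c0 ≤ 'Z')) || c0 == '_'
  if !upLow then "NO" else cGoA (xs.drop 1)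

-- ===== PORT B =====
-- hand port of Python str.isidentifier(): EXACT on the ASCII domain (Dom_), where
-- XID_Start = [A-Za-z_] and XID_Continue = [A-Za-z0-9_]; '' is not an identifier.
def pyIsIdentifier : List Char → Bool
  | [] => false
  | c :: rest => (c.isAlpha || c == '_') && rest.all (fun d => d.isAlphanum || d == '_')

def c_compatible_alt (variable_ : String) : String :=
  if pyIsIdentifier variable_.toList then "YES" else "NO"

-- ===== PRECONDITION & SPEC =====
-- Pre_ excludes exactly the empty string, on which A raises IndexError at variable[0].
def Pre_c_compatible (variable_ : String) : Prop := variable_ ≠ ""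
instance (variable_ : String) : Decidable (Pre_c_compatible variable_) := by
  unfold Pre_c_compatible; infer_instance
def pvWitness_c_compatible : String := "a"

def Spec_c_compatible (variable_ : String) (out : String) : Prop := out = c_compatible_alt variable_
instance (variable_ : String) (out : String) : Decidable (Spec_c_compatible variable_ out) := by
  unfold Spec_c_compatible; infer_instance

-- ===== CLAIM (what is proved, stated in full; the proofs are below) =====
def Claim_equal_c_compatible : Prop := ∀ (variable_ : String), Dom_c_compatible variable_ →
  Pre_c_compatible variable_ → Spec_c_compatible variable_ (c_compatible variable_)

-- ===== LEMMAS AND PROOFS =====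
-- A's body character class coincides with B's (isAlphanum or underscore)
theorem bodyClass_eq (c : Char) :
    ((decide ('a' ≤ c) && decide (c ≤ 'z')) || (decide ('A' ≤ c) && decide (c ≤ 'Z')) ||
      c == '_' || PySem.Chars.isdigit c) = (c.isAlphanum || c == '_') := by
  have hd : PySem.Chars.isdigit c = c.isDigit := by
    unfold PySem.Chars.isdigit Char.isDigit; rfl
  rw [Bool.eq_iff_iff]
  simp only [hd, Char.isAlphanum, Char.isAlpha, Char.isUpper, Char.isLower, Char.isDigit,
    Char.le_def, ge_iff_le, Bool.or_eq_true, Bool.and_eq_true, decide_eq_true_eq]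
  tauto

-- A's first-character class coincides with B's (isAlpha or underscore)
theorem headClass_eq (c : Char) :
    ((decide ('a' ≤ c) && decide (c ≤ 'z')) || (decide ('A' ≤ c) && decide (c ≤ 'Z')) ||
      c == '_') = (c.isAlpha || c == '_') := by
  rw [Bool.eq_iff_iff]
  simp only [Char.isAlpha, Char.isUpper, Char.isLower, Char.le_def, ge_iff_le,
    Bool.or_eq_true, Bool.and_eq_true, decide_eq_true_eq]
  tauto

-- A's early-return loop computes an 'all' over the suffix
theorem cGoA_eq_all (l : List Char) :
    cGoA l = if l.all (fun d => d.isAlphanum || d == '_') then "YES" else "NO" := by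
  induction l with
  | nil => rfl
  | cons c rest ih =>
    simp only [cGoA, List.all_cons, bodyClass_eq]
    by_cases h : (c.isAlphanum || c == '_') = true
    · simp [h, ih]
    · rw [Bool.not_eq_true] at h; simp [h]

theorem toList_ne_nil (s : String) (h : s ≠ "") : s.toList ≠ [] := by
  intro hn; apply h
  simpa using congrArg String.ofList hn

-- ===== VERDICT (by name: the statement is the Claim_ definition above) =====
theorem c_compatible_spec : Claim_equal_c_compatible := by
  intro v _ hpre
  unfold Spec_c_compatible c_compatible c_compatible_alt
  obtain ⟨c0, rest, hl⟩ := List.exists_cons_of_ne_nil (toList_ne_nil v hpre)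
  rw [hl]
  simp only [PySem.List.pyGetD_zero_cons, List.drop_succ_cons, List.drop_zero,
    pyIsIdentifier, headClass_eq, cGoA_eq_all]
  by_cases hh : (c0.isAlpha || c0 == '_') = true
  · simp [hh]
  · rw [Bool.not_eq_true] at hh; simp [hh]
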